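-- pv_equiv track=rewrite | github.com/qoocrab/project-algorithm-programmers | level_1/KCH/20231023/공원산책.py | solution
-- ===== SOURCE A (Python) =====
-- def find_start(park):
--     for i in range(len(park)):
--         for j in range(len(park[i])):
--             if park[i][j] == 'S':
--                 return i, j
--
-- def solution(park, routes):
--     dir_dict = {'E': (0,1), 'W': (0,-1), 'S': (1,0), 'N': (-1,0)}
--     x, y = find_start(park)
--
--     for i in routes:
--         direction, cnt = i.split()
--         nx, ny = x, y
--         for _ in range(int(cnt)):
--             nx += dir_dict[direction][0]
--             ny += dir_dict[direction][1]
--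
--             if not(0<=nx<len(park) and 0<=ny<len(park[0]) and park[nx][ny] != 'X'):
--                 break
--         else: x, y = nx, ny
--
--     return [x, y]
-- ===== SOURCE B (Python) =====
-- def solution(park, routes):
--     h, w = len(park), len(park[0])
--     cols = [''.join(t) for t in zip(*park)]
--     x = y = 0
--     for i, row in enumerate(park):
--         j = row.find('S')
--         if j != -1:
--             x, y = i, j
--             break
--     for r in routes:
--         d, c = r.split()
--         n = int(c)
--         if d == 'E':
--             if y + n < w and 'X' not in park[x][y+1:y+n+1]:
--                 y += n
--         elif d == 'W':
--             if n <= y and 'X' not in park[x][y-n:y]: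
--                 y -= n
--         elif d == 'S':
--             if x + n < h and 'X' not in cols[y][x+1:x+n+1]:
--                 x += n
--         else:
--             if n <= x and 'X' not in cols[y][x-n:x]:
--                 x -= n
--     return [x, y]
-- ===== Notes on version B (the rewrite author's own statement) =====
-- stated objective: alternative
-- what changed: B replaces A's cell-by-cell stepping loop per route by computing the target arithmetically and testing 'X' not in a single row/column slice, over a column table built once by zip(*park), instead of incrementing coordinates one step at a time with break/else.
-- outside the precondition, e.g. on solution(['SO', 'XO'], ['E -1']): A returns [0, 0], B returns [0, -1]; on solution(['SX', 'abc'], ['E 1']): A returns [0, 0], B returns [0, 0]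
import Mathlib
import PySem

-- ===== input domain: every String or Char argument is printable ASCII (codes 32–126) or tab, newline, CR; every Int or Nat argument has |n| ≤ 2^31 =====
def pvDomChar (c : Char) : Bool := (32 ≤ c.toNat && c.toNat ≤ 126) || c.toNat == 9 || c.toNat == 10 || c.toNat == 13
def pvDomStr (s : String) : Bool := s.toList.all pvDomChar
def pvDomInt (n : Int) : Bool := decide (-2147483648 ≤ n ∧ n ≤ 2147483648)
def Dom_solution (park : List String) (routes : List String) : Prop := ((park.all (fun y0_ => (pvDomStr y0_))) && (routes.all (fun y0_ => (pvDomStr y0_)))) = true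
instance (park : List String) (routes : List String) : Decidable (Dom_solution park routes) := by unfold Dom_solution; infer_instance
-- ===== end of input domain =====

-- B replaces A's cell-by-cell stepping by one arithmetic target plus a substring ('X' not in slice)
-- check per route, over precomputed column strings (objective: alternative; return value only, no mutation).

-- ===== PORT A =====

-- inner loop of find_start over one row
def pvFindS : List Char → Nat → Option Nat
  | [], _ => none
  | c :: cs, j => if c == 'S' then some j else pvFindS cs (j + 1)

-- find_start(park)
def pvFindStart : List String → Nat → Option (Nat × Nat)
  | [], _ => none
  | r :: rest, i =>
    match pvFindS r.toList 0 with
    | some j => some (i, j)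
    | none => pvFindStart rest (i + 1)

-- park[nx][ny] (guarded in-bounds where used)
def pvCell (park : List String) (nx ny : Int) : Char :=
  PySem.List.pyGetD (PySem.List.pyGetD park nx "").toList ny ' '

-- the 'for _ in range(int(cnt))' loop with break/else: some = completed, none = broke
def pvStep (park : List String) (dx dy : Int) : Nat → Int → Int → Option (Int × Int)
  | 0, nx, ny => some (nx, ny)
  | n + 1, nx, ny =>
    let nx' := nx + dx
    let ny' := ny + dy
    if 0 ≤ nx' ∧ nx' < (park.length : Int) ∧ 0 ≤ ny' ∧
        ny' < PySem.Str.len (PySem.List.pyGetD park 0 "") ∧ pvCell park nx' ny' ≠ 'X'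
    then pvStep park dx dy n nx' ny' else none

def pvDirDict : PySem.Dict String (Int × Int) :=
  ((((PySem.Dict.empty).insert "E" (0, 1)).insert "W" (0, -1)).insert "S" (1, 0)).insert "N" (-1, 0)

-- body of A's loop over routes
def pvAMove (park : List String) (p : Int × Int) (i : String) : Int × Int :=
  let parts := PySem.Str.split₀ i
  let direction := parts.getD 0 ""
  let cnt := (PySem.Int.ofStr? (parts.getD 1 "")).getD 0
  let d := pvDirDict.getD direction (0, 0)
  match pvStep park d.1 d.2 cnt.toNat p.1 p.2 with
  | some q => q
  | none => p

def solution (park : List String) (routes : List String) : List Int :=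
  let s := (pvFindStart park 0).getD (0, 0)
  let p := routes.foldl (pvAMove park) ((s.1 : Int), (s.2 : Int))
  [p.1, p.2]

-- ===== PORT B =====

-- number of tuples produced by zip(*park): the minimum row length
def pvMinLen : List String → Nat
  | [] => 0
  | [r] => r.toList.length
  | r :: rest => min r.toList.length (pvMinLen rest)

-- cols = [''.join(t) for t in zip(*park)] (as char lists): truncating transpose
def pvCols (park : List String) : List (List Char) :=
  (PySem.List.pyRange 0 (pvMinLen park : Int) 1).map
    (fun j => park.map (fun row => PySem.List.pyGetD row.toList j ' '))

-- start search: first row with row.find('S') != -1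
def pvFirstS : List String → Nat → Int × Int
  | [], _ => (0, 0)
  | r :: rest, i =>
    let j := PySem.Str.find r "S"
    if j ≠ -1 then ((i : Int), j) else pvFirstS rest (i + 1)

-- body of B's loop over routes
def pvBMove (park : List String) (cols : List (List Char)) (h w : Int)
    (p : Int × Int) (r : String) : Int × Int :=
  let parts := PySem.Str.split₀ r
  let d := parts.getD 0 ""
  let n := (PySem.Int.ofStr? (parts.getD 1 "")).getD 0
  let x := p.1
  let y := p.2
  if d = "E" then
    if y + n < w ∧ PySem.Chars.isIn ['X']
        (PySem.List.slice (PySem.List.pyGetD park x "").toList (some (y + 1)) (some (y + n + 1))) = false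
    then (x, y + n) else (x, y)
  else if d = "W" then
    if n ≤ y ∧ PySem.Chars.isIn ['X']
        (PySem.List.slice (PySem.List.pyGetD park x "").toList (some (y - n)) (some y)) = false
    then (x, y - n) else (x, y)
  else if d = "S" then
    if x + n < h ∧ PySem.Chars.isIn ['X']
        (PySem.List.slice (PySem.List.pyGetD cols y []) (some (x + 1)) (some (x + n + 1))) = false
    then (x + n, y) else (x, y)
  else
    if n ≤ x ∧ PySem.Chars.isIn ['X']
        (PySem.List.slice (PySem.List.pyGetD cols y []) (some (x - n)) (some x)) = false
    then (x - n, y) else (x, y)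

def solution_alt (park : List String) (routes : List String) : List Int :=
  let h := (park.length : Int)
  let w := PySem.Str.len (PySem.List.pyGetD park 0 "")
  let cols := pvCols park
  let s := pvFirstS park 0
  let p := routes.foldl (pvBMove park cols h w) s
  [p.1, p.2]

-- ===== PRECONDITION & SPEC =====

-- one route string is 'D n' with D a compass letter and n a nonnegative int literal
def pvRouteOk (r : String) : Bool :=
  match PySem.Str.split₀ r with
  | [d, c] =>
    (d == "E" || d == "W" || d == "S" || d == "N") &&
      (match PySem.Int.ofStr? c with
       | some n => decide (0 ≤ n)
       | none => false)
  | _ => false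

-- Pre_ restricts to the problem's natural domain: a park containing 'S', rectangular whenever any
-- route is to be walked (on ragged parks A's stepping may raise IndexError mid-route), and routes of
-- the form 'D n' with D in EWSN and n a nonnegative integer (else A raises ValueError/KeyError;
-- negative n, on which A's empty range() makes a silent no-op, is outside the task's natural domain).
def Pre_solution (park : List String) (routes : List String) : Prop :=
  (park.any (fun r => r.toList.contains 'S')) = true ∧
  (routes = [] ∨ (park.all (fun r => r.toList.length == (park.headD "").toList.length)) = true) ∧
  (routes.all pvRouteOk) = true

instance (park : List String) (routes : List String) : Decidable (Pre_solution park routes) := by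
  unfold Pre_solution; infer_instance

def pvWitness_solution : List String × List String :=
  (["SO", "XO"], ["E 1", "S 1", "W 1"])

def Spec_solution (park : List String) (routes : List String) (out : List Int) : Prop :=
  out = solution_alt park routes
instance (park : List String) (routes : List String) (out : List Int) : Decidable (Spec_solution park routes out) := by
  unfold Spec_solution; infer_instance

-- ===== CLAIM (what is proved, stated in full; the proofs are below) =====
def Claim_equal_solution : Prop := ∀ (park : List String) (routes : List String), Dom_solution park routes → Pre_solution park routes → Spec_solution park routes (solution park routes)

-- ===== LEMMAS AND PROOFS =====

-- width expression shared by both ports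
abbrev pvL (park : List String) : Int := PySem.Str.len (PySem.List.pyGetD park 0 "")

-- A's per-step guard
abbrev pvOk (park : List String) (nx ny : Int) : Prop :=
  0 ≤ nx ∧ nx < (park.length : Int) ∧ 0 ≤ ny ∧ ny < pvL park ∧ pvCell park nx ny ≠ 'X'

lemma pvStep_succ (park : List String) (dx dy : Int) (n : Nat) (x y : Int) :
    pvStep park dx dy (n+1) x y =
      if pvOk park (x+dx) (y+dy) then pvStep park dx dy n (x+dx) (y+dy) else none := by
  rfl

lemma pvStep_char (park : List String) (dx dy : Int) :
    ∀ (n : Nat) (x y : Int),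
      pvStep park dx dy n x y =
        if (∀ k : Nat, k < n → pvOk park (x + dx * ((k : Int) + 1)) (y + dy * ((k : Int) + 1)))
        then some (x + dx * (n : Int), y + dy * (n : Int)) else none := by
  intro n
  induction n with
  | zero => intro x y; simp [pvStep]
  | succ n IH =>
    intro x y
    rw [pvStep_succ]
    by_cases h0 : pvOk park (x+dx) (y+dy)
    · rw [if_pos h0, IH]
      have hiff : (∀ k : Nat, k < n → pvOk park ((x+dx) + dx * ((k:Int)+1)) ((y+dy) + dy * ((k:Int)+1)))
          ↔ (∀ k : Nat, k < n+1 → pvOk park (x + dx * ((k:Int)+1)) (y + dy * ((k:Int)+1))) := by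
      
        constructor
        · intro h k hk
          rcases k with _ | k
          · simpa using h0
          · have hkn := h k (by omega)
            have e1 : (x+dx) + dx * ((k:Int)+1) = x + dx * (((k+1:Nat):Int)+1) := by push_cast; ring
            have e2 : (y+dy) + dy * ((k:Int)+1) = y + dy * (((k+1:Nat):Int)+1) := by push_cast; ring
            rwa [e1, e2] at hkn
        · intro h k hk
          have hkn := h (k+1) (by omega)
          have e1 : (x+dx) + dx * ((k:Int)+1) = x + dx * (((k+1:Nat):Int)+1) := by push_cast; ring
          have e2 : (y+dy) + dy * ((k:Int)+1) = y + dy * (((k+1:Nat):Int)+1) := by push_cast; ring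
          rwa [e1, e2]
      split_ifs with h1 h2 h2
      · have : (x+dx) + dx * (n:Int) = x + dx * ((n+1 : Nat):Int) := by push_cast; ring
        rw [this]
        have : (y+dy) + dy * (n:Int) = y + dy * ((n+1 : Nat):Int) := by push_cast; ring
        rw [this]
      · exact absurd (hiff.mp h1) h2
      · exact absurd (hiff.mpr h2) h1
      · rfl
    · rw [if_neg h0, if_neg]
      intro hC
      exact h0 (by simpa using hC 0 (by omega))



lemma pvIsIn_false (s : List Char) : PySem.Chars.isIn ['X'] s = false ↔ 'X' ∉ s := by
  rw [← Bool.not_eq_true, PySem.Chars.isIn_iff_infix, List.singleton_infix_iff]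

lemma pvMemTakeDrop (s : List Char) (a m : Nat) :
    'X' ∈ (s.drop a).take m ↔ ∃ k, k < m ∧ a + k < s.length ∧ s.getD (a+k) ' ' = 'X' := by
  rw [List.mem_iff_getElem]
  constructor
  · rintro ⟨i, hi, he⟩
    have hlen : ((s.drop a).take m).length = min m (s.length - a) := by simp
    rw [hlen] at hi
    refine ⟨i, by omega, by omega, ?_⟩
    rw [List.getD_eq_getElem s ' ' (by omega)]
    rw [List.getElem_take, List.getElem_drop] at he
    exact he
  · rintro ⟨k, hk, hlt, he⟩
    refine ⟨k, by simp; omega, ?_⟩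
    rw [List.getElem_take, List.getElem_drop]
    rw [List.getD_eq_getElem s ' ' (by omega)] at he
    exact he

lemma pvGetD0_head {α : Type} (s : List α) (d : α) : PySem.List.pyGetD s (0:Int) d = s.headD d := by
  cases s <;> simp [pysem]

lemma pvRow (park : List String) (a : Nat) (ha : a < park.length) :
    PySem.List.pyGetD park (a:Int) "" = park[a] := by
  rw [PySem.List.pyGetD_of_nonneg _ _ (by positivity), Int.toNat_natCast]
  exact List.getD_eq_getElem park "" (by simpa using ha)

lemma pvCell_nat (park : List String) (a b : Nat) (ha : a < park.length) :
    pvCell park (a:Int) (b:Int) = (park[a].toList).getD b ' ' := by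
  unfold pvCell
  rw [pvRow park a ha, PySem.List.pyGetD_of_nonneg _ _ (by positivity)]
  simp

lemma pvColsGet (park : List String) (b : Nat) (hb : b < pvMinLen park) :
    PySem.List.pyGetD (pvCols park) (b:Int) [] =
      park.map (fun row => PySem.List.pyGetD row.toList (b:Int) ' ') := by
  rw [PySem.List.pyGetD_of_nonneg _ _ (by positivity), Int.toNat_natCast]
  rw [List.getD_eq_getElem?_getD]
  unfold pvCols
  rw [PySem.List.getElem?_map_pyRange_zero _ _ _ hb]
  rfl

lemma pvColGetD (park : List String) (b k : Nat) (hk : k < park.length) :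
    (park.map (fun row => PySem.List.pyGetD row.toList (b:Int) ' ')).getD k ' ' = pvCell park (k:Int) (b:Int) := by
  rw [List.getD_eq_getElem _ ' ' (by simpa using hk), List.getElem_map]
  unfold pvCell
  rw [pvRow park k hk]

lemma pvLineFwd (s : List Char) (b n : Nat) (hb : b < s.length) :
    (∀ k, k < n → (b+1+k < s.length ∧ s.getD (b+1+k) ' ' ≠ 'X')) ↔
      (b + n < s.length ∧ 'X' ∉ (s.drop (b+1)).take n) := by
  constructor
  · intro h
    refine ⟨?_, ?_⟩
    · rcases n with _|n
      · omega
      · have := (h n (by omega)).1; omega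
    · intro hmem
      rcases (pvMemTakeDrop s (b+1) n).mp hmem with ⟨k, hk, hlt, he⟩
      exact (h k hk).2 he
  · rintro ⟨hlen, hmem⟩ k hk
    exact ⟨by omega, fun he => hmem ((pvMemTakeDrop s (b+1) n).mpr ⟨k, hk, by omega, he⟩)⟩

lemma pvLineBwd (s : List Char) (b n : Nat) (hb : b < s.length) :
    (∀ k, k < n → (k+1 ≤ b ∧ s.getD (b-(k+1)) ' ' ≠ 'X')) ↔
      (n ≤ b ∧ 'X' ∉ (s.drop (b-n)).take n) := by
  constructor
  · intro h
    have hnb : n ≤ b := by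
      rcases n with _|n
      · omega
      · have := (h n (by omega)).1; omega
    refine ⟨hnb, fun hmem => ?_⟩
    rcases (pvMemTakeDrop s (b-n) n).mp hmem with ⟨k, hk, hlt, he⟩
    apply (h (n-1-k) (by omega)).2
    rw [show b-((n-1-k)+1) = b-n+k by omega]
    exact he
  · rintro ⟨hnb, hmem⟩ k hk
    refine ⟨by omega, fun he => hmem ((pvMemTakeDrop s (b-n) n).mpr ⟨n-1-k, by omega, by omega, ?_⟩)⟩
    rw [show b-n+(n-1-k) = b-(k+1) by omega]
    exact he


-- A's match-on-step for direction E equals B's slice test, with bounds of the result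
lemma pvMoveE (park : List String)
    (hRect : ∀ s ∈ park, ((s.toList.length : Int)) = pvL park)
    (a b n : Nat) (ha : a < park.length) (hb : (b:Int) < pvL park) :
    (match pvStep park 0 1 n (a:Int) (b:Int) with
      | some q => q | none => ((a:Int), (b:Int))) =
      (if ((b:Int) + (n:Int) < pvL park ∧ PySem.Chars.isIn ['X']
            (PySem.List.slice (PySem.List.pyGetD park (a:Int) "").toList
              (some ((b:Int)+1)) (some ((b:Int)+(n:Int)+1))) = false)
        then ((a:Int), (b:Int)+(n:Int)) else ((a:Int), (b:Int))) ∧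
    ∃ a' b' : Nat, (match pvStep park 0 1 n (a:Int) (b:Int) with
      | some q => q | none => ((a:Int), (b:Int))) = ((a':Int), (b':Int)) ∧
      a' < park.length ∧ ((b':Int)) < pvL park := by
  have hmem : park[a] ∈ park := List.getElem_mem (by simpa using ha)
  have hrowlen : ((park[a].toList.length : Int)) = pvL park := hRect _ hmem
  have hbrow : b < park[a].toList.length := by omega
  have h1 : ∀ k : Nat, (pvOk park (a:Int) ((b:Int)+((k:Int)+1)) ↔
      (b+1+k < park[a].toList.length ∧ park[a].toList.getD (b+1+k) ' ' ≠ 'X')) := by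
    intro k
    have e : (b:Int)+((k:Int)+1) = ((b+1+k : Nat):Int) := by push_cast; ring
    rw [e]
    unfold pvOk
    rw [pvCell_nat park a (b+1+k) ha]
    constructor
    · rintro ⟨_, _, _, hlt, hcell⟩
      exact ⟨by omega, hcell⟩
    · rintro ⟨hlt, hcell⟩
      exact ⟨by positivity, by exact_mod_cast ha, by positivity, by omega, hcell⟩
  have hcond : (∀ k : Nat, k < n → pvOk park (a:Int) ((b:Int)+((k:Int)+1))) ↔
      ((b:Int) + (n:Int) < pvL park ∧ PySem.Chars.isIn ['X']
        (PySem.List.slice (PySem.List.pyGetD park (a:Int) "").toList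
          (some ((b:Int)+1)) (some ((b:Int)+(n:Int)+1))) = false) := by
    rw [forall₂_congr (fun k _ => h1 k), pvLineFwd _ _ _ hbrow]
    rw [pvRow park a ha]
    rw [PySem.List.slice_toNat _ (by positivity) (by positivity)]
    rw [show ((b:Int)+1).toNat = b+1 by omega, show ((b:Int)+(n:Int)+1).toNat = b+n+1 by omega,
        show b+n+1-(b+1) = n by omega]
    rw [pvIsIn_false]
    constructor
    · rintro ⟨h2, h3⟩; exact ⟨by omega, h3⟩
    · rintro ⟨h2, h3⟩; exact ⟨by omega, h3⟩
  rw [pvStep_char]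
  simp only [zero_mul, one_mul, add_zero]
  by_cases hC : (∀ k : Nat, k < n → pvOk park (a:Int) ((b:Int)+((k:Int)+1)))
  · rw [if_pos hC, if_pos (hcond.mp hC)]
    refine ⟨rfl, a, b+n, by push_cast; ring_nf, ha, ?_⟩
    have := (hcond.mp hC).1; push_cast; omega
  · rw [if_neg hC, if_neg (fun h => hC (hcond.mpr h))]
    exact ⟨rfl, a, b, rfl, ha, hb⟩


lemma pvMoveW (park : List String)
    (hRect : ∀ s ∈ park, ((s.toList.length : Int)) = pvL park)
    (a b n : Nat) (ha : a < park.length) (hb : (b:Int) < pvL park) :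
    (match pvStep park 0 (-1) n (a:Int) (b:Int) with
      | some q => q | none => ((a:Int), (b:Int))) =
      (if ((n:Int) ≤ (b:Int) ∧ PySem.Chars.isIn ['X']
            (PySem.List.slice (PySem.List.pyGetD park (a:Int) "").toList
              (some ((b:Int)-(n:Int))) (some (b:Int))) = false)
        then ((a:Int), (b:Int)-(n:Int)) else ((a:Int), (b:Int))) ∧
    ∃ a' b' : Nat, (match pvStep park 0 (-1) n (a:Int) (b:Int) with
      | some q => q | none => ((a:Int), (b:Int))) = ((a':Int), (b':Int)) ∧
      a' < park.length ∧ ((b':Int)) < pvL park := by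
  have hmem : park[a] ∈ park := List.getElem_mem (by simpa using ha)
  have hrowlen : ((park[a].toList.length : Int)) = pvL park := hRect _ hmem
  have hbrow : b < park[a].toList.length := by omega
  have h1 : ∀ k : Nat, (pvOk park (a:Int) ((b:Int) + -((k:Int)+1)) ↔
      (k+1 ≤ b ∧ park[a].toList.getD (b-(k+1)) ' ' ≠ 'X')) := by
    intro k
    constructor
    · rintro ⟨_, _, h0, hlt, hcell⟩
      have hkb : k+1 ≤ b := by omega
      have e : (b:Int) + -((k:Int)+1) = ((b-(k+1) : Nat) : Int) := by omega
      rw [e, pvCell_nat park a _ ha] at hcell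
      exact ⟨hkb, hcell⟩
    · rintro ⟨hkb, hcell⟩
      have e : (b:Int) + -((k:Int)+1) = ((b-(k+1) : Nat) : Int) := by omega
      refine ⟨by positivity, by exact_mod_cast ha, by omega, by omega, ?_⟩
      rw [e, pvCell_nat park a _ ha]
      exact hcell
  have hcond : (∀ k : Nat, k < n → pvOk park (a:Int) ((b:Int) + -((k:Int)+1))) ↔
      ((n:Int) ≤ (b:Int) ∧ PySem.Chars.isIn ['X']
        (PySem.List.slice (PySem.List.pyGetD park (a:Int) "").toList
          (some ((b:Int)-(n:Int))) (some (b:Int))) = false) := by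
    rw [forall₂_congr (fun k _ => h1 k), pvLineBwd _ _ _ hbrow, pvRow park a ha]
    by_cases hnb : n ≤ b
    · rw [PySem.List.slice_toNat _ (by omega) (by positivity)]
      rw [show ((b:Int)-(n:Int)).toNat = b-n by omega, show ((b:Int)).toNat = b by omega,
          show b-(b-n) = n by omega]
      rw [pvIsIn_false]
      constructor
      · rintro ⟨h2, h3⟩; exact ⟨by omega, h3⟩
      · rintro ⟨h2, h3⟩; exact ⟨by omega, h3⟩
    · constructor
      · rintro ⟨h2, _⟩; exact absurd h2 (by omega)
      · rintro ⟨h2, _⟩; exact absurd h2 (by omega)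
  rw [pvStep_char]
  simp only [zero_mul, add_zero, neg_one_mul]
  by_cases hC : (∀ k : Nat, k < n → pvOk park (a:Int) ((b:Int) + -((k:Int)+1)))
  · rw [if_pos hC, if_pos (hcond.mp hC)]
    have hnb := (hcond.mp hC).1
    refine ⟨by rw [sub_eq_add_neg], a, b-n, ?_, ha, by omega⟩
    simp only [Prod.mk.injEq]
    exact ⟨trivial, by omega⟩
  · rw [if_neg hC, if_neg (fun h => hC (hcond.mpr h))]
    exact ⟨rfl, a, b, rfl, ha, hb⟩

lemma pvMinLen_eq (park : List String) (L : Int) (hne : park ≠ [])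
    (hR : ∀ r ∈ park, ((r.toList.length : Int)) = L) : ((pvMinLen park : Nat) : Int) = L := by
  induction park with
  | nil => exact absurd rfl hne
  | cons r rest IH =>
    rcases rest with _ | ⟨r2, rest⟩
    · rw [pvMinLen]
      exact hR r (by simp)
    · have e : pvMinLen (r :: r2 :: rest) = min r.toList.length (pvMinLen (r2 :: rest)) := rfl
      rw [e]
      have h1 := hR r (by simp)
      have h2 := IH (List.cons_ne_nil r2 rest) (fun x hx => hR x (by simp [hx]))
      have h3 : r.toList.length = pvMinLen (r2 :: rest) := by omega
      rw [h3, min_self]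
      exact h2

lemma pvMoveS (park : List String)
    (hRect : ∀ s ∈ park, ((s.toList.length : Int)) = pvL park)
    (a b n : Nat) (ha : a < park.length) (hb : (b:Int) < pvL park) :
    (match pvStep park 1 0 n (a:Int) (b:Int) with
      | some q => q | none => ((a:Int), (b:Int))) =
      (if ((a:Int) + (n:Int) < (park.length : Int) ∧ PySem.Chars.isIn ['X']
            (PySem.List.slice (PySem.List.pyGetD (pvCols park) (b:Int) [])
              (some ((a:Int)+1)) (some ((a:Int)+(n:Int)+1))) = false)
        then ((a:Int)+(n:Int), (b:Int)) else ((a:Int), (b:Int))) ∧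
    ∃ a' b' : Nat, (match pvStep park 1 0 n (a:Int) (b:Int) with
      | some q => q | none => ((a:Int), (b:Int))) = ((a':Int), (b':Int)) ∧
      a' < park.length ∧ ((b':Int)) < pvL park := by
  have hne : park ≠ [] := by intro h; rw [h] at ha; simp at ha
  have hbw : b < pvMinLen park := by
    have := pvMinLen_eq park (pvL park) hne hRect
    omega
  have hcols := pvColsGet park b hbw
  have hcl : (park.map (fun row => PySem.List.pyGetD row.toList (b:Int) ' ')).length = park.length := by
    simp
  have h1 : ∀ k : Nat, (pvOk park ((a:Int)+((k:Int)+1)) (b:Int) ↔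
      (a+1+k < (park.map (fun row => PySem.List.pyGetD row.toList (b:Int) ' ')).length ∧
       (park.map (fun row => PySem.List.pyGetD row.toList (b:Int) ' ')).getD (a+1+k) ' ' ≠ 'X')) := by
    intro k
    have e : (a:Int)+((k:Int)+1) = ((a+1+k : Nat):Int) := by push_cast; ring
    rw [e, hcl]
    constructor
    · rintro ⟨_, hlt, _, _, hcell⟩
      have hk : a+1+k < park.length := by omega
      rw [pvColGetD park b (a+1+k) hk]
      exact ⟨hk, hcell⟩
    · rintro ⟨hk, hcell⟩
      rw [pvColGetD park b (a+1+k) hk] at hcell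
      exact ⟨by positivity, by omega, by positivity, hb, hcell⟩
  have hcond : (∀ k : Nat, k < n → pvOk park ((a:Int)+((k:Int)+1)) (b:Int)) ↔
      ((a:Int) + (n:Int) < (park.length : Int) ∧ PySem.Chars.isIn ['X']
        (PySem.List.slice (PySem.List.pyGetD (pvCols park) (b:Int) [])
          (some ((a:Int)+1)) (some ((a:Int)+(n:Int)+1))) = false) := by
    rw [forall₂_congr (fun k _ => h1 k),
        pvLineFwd _ _ _ (by rw [hcl]; exact ha), hcols]
    rw [PySem.List.slice_toNat _ (by positivity) (by positivity)]
    rw [show ((a:Int)+1).toNat = a+1 by omega, show ((a:Int)+(n:Int)+1).toNat = a+n+1 by omega,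
        show a+n+1-(a+1) = n by omega]
    rw [pvIsIn_false, hcl]
    constructor
    · rintro ⟨h2, h3⟩; exact ⟨by omega, h3⟩
    · rintro ⟨h2, h3⟩; exact ⟨by omega, h3⟩
  rw [pvStep_char]
  simp only [zero_mul, one_mul, add_zero]
  by_cases hC : (∀ k : Nat, k < n → pvOk park ((a:Int)+((k:Int)+1)) (b:Int))
  · rw [if_pos hC, if_pos (hcond.mp hC)]
    have hne := (hcond.mp hC).1
    refine ⟨rfl, a+n, b, ?_, by omega, hb⟩
    simp only [Prod.mk.injEq]
    exact ⟨by push_cast; ring, trivial⟩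
  · rw [if_neg hC, if_neg (fun h => hC (hcond.mpr h))]
    exact ⟨rfl, a, b, rfl, ha, hb⟩

lemma pvMoveN (park : List String)
    (hRect : ∀ s ∈ park, ((s.toList.length : Int)) = pvL park)
    (a b n : Nat) (ha : a < park.length) (hb : (b:Int) < pvL park) :
    (match pvStep park (-1) 0 n (a:Int) (b:Int) with
      | some q => q | none => ((a:Int), (b:Int))) =
      (if ((n:Int) ≤ (a:Int) ∧ PySem.Chars.isIn ['X']
            (PySem.List.slice (PySem.List.pyGetD (pvCols park) (b:Int) [])
              (some ((a:Int)-(n:Int))) (some (a:Int))) = false)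
        then ((a:Int)-(n:Int), (b:Int)) else ((a:Int), (b:Int))) ∧
    ∃ a' b' : Nat, (match pvStep park (-1) 0 n (a:Int) (b:Int) with
      | some q => q | none => ((a:Int), (b:Int))) = ((a':Int), (b':Int)) ∧
      a' < park.length ∧ ((b':Int)) < pvL park := by
  have hne : park ≠ [] := by intro h; rw [h] at ha; simp at ha
  have hbw : b < pvMinLen park := by
    have := pvMinLen_eq park (pvL park) hne hRect
    omega
  have hcols := pvColsGet park b hbw
  have hcl : (park.map (fun row => PySem.List.pyGetD row.toList (b:Int) ' ')).length = park.length := by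
    simp
  have h1 : ∀ k : Nat, (pvOk park ((a:Int) + -((k:Int)+1)) (b:Int) ↔
      (k+1 ≤ a ∧
       (park.map (fun row => PySem.List.pyGetD row.toList (b:Int) ' ')).getD (a-(k+1)) ' ' ≠ 'X')) := by
    intro k
    constructor
    · rintro ⟨h0, hlt, _, _, hcell⟩
      have hka : k+1 ≤ a := by omega
      have e : (a:Int) + -((k:Int)+1) = ((a-(k+1) : Nat) : Int) := by omega
      rw [e] at hcell
      rw [pvColGetD park b (a-(k+1)) (by omega)]
      exact ⟨hka, hcell⟩
    · rintro ⟨hka, hcell⟩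
      have e : (a:Int) + -((k:Int)+1) = ((a-(k+1) : Nat) : Int) := by omega
      rw [pvColGetD park b (a-(k+1)) (by omega)] at hcell
      refine ⟨by omega, by omega, by positivity, hb, ?_⟩
      rw [e]
      exact hcell
  have hcond : (∀ k : Nat, k < n → pvOk park ((a:Int) + -((k:Int)+1)) (b:Int)) ↔
      ((n:Int) ≤ (a:Int) ∧ PySem.Chars.isIn ['X']
        (PySem.List.slice (PySem.List.pyGetD (pvCols park) (b:Int) [])
          (some ((a:Int)-(n:Int))) (some (a:Int))) = false) := by
    rw [forall₂_congr (fun k _ => h1 k),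
        pvLineBwd _ _ _ (by rw [hcl]; exact ha), hcols]
    by_cases hna : n ≤ a
    · rw [PySem.List.slice_toNat _ (by omega) (by positivity)]
      rw [show ((a:Int)-(n:Int)).toNat = a-n by omega, show ((a:Int)).toNat = a by omega,
          show a-(a-n) = n by omega]
      rw [pvIsIn_false]
      constructor
      · rintro ⟨h2, h3⟩; exact ⟨by omega, h3⟩
      · rintro ⟨h2, h3⟩; exact ⟨by omega, h3⟩
    · constructor
      · rintro ⟨h2, _⟩; exact absurd h2 (by omega)
      · rintro ⟨h2, _⟩; exact absurd h2 (by omega)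
  rw [pvStep_char]
  simp only [zero_mul, add_zero, neg_one_mul]
  by_cases hC : (∀ k : Nat, k < n → pvOk park ((a:Int) + -((k:Int)+1)) (b:Int))
  · rw [if_pos hC, if_pos (hcond.mp hC)]
    have hna := (hcond.mp hC).1
    refine ⟨by rw [sub_eq_add_neg], a-n, b, ?_, by omega, hb⟩
    simp only [Prod.mk.injEq]
    exact ⟨by omega, trivial⟩
  · rw [if_neg hC, if_neg (fun h => hC (hcond.mpr h))]
    exact ⟨rfl, a, b, rfl, ha, hb⟩


lemma pvMove_eq (park : List String) (r : String)
    (hRect : ∀ s ∈ park, ((s.toList.length : Int)) = pvL park)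
    (hr : pvRouteOk r = true) (a b : Nat) (ha : a < park.length) (hb : (b:Int) < pvL park) :
    pvAMove park ((a:Int),(b:Int)) r
        = pvBMove park (pvCols park) (park.length : Int) (pvL park) ((a:Int),(b:Int)) r ∧
    ∃ a' b' : Nat, pvAMove park ((a:Int),(b:Int)) r = ((a':Int),(b':Int)) ∧
      a' < park.length ∧ ((b':Int)) < pvL park := by
  unfold pvRouteOk at hr
  rcases hps : PySem.Str.split₀ r with _ | ⟨d, _ | ⟨c, _ | ⟨e, rest⟩⟩⟩ <;> rw [hps] at hr
  · simp at hr
  · simp at hr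
  case cons.cons.cons => simp at hr
  simp only [Bool.and_eq_true, Bool.or_eq_true, beq_iff_eq] at hr
  rcases hoc : PySem.Int.ofStr? c with _ | m <;> rw [hoc] at hr
  · simp at hr
  simp only [decide_eq_true_eq] at hr
  obtain ⟨hd, hm0⟩ := hr
  have hmn : m = ((m.toNat : Nat) : Int) := by omega
  simp only [pvAMove, pvBMove, hps, hoc, List.getD_cons_zero, List.getD_cons_succ,
    Option.getD_some]
  rw [hmn, Int.toNat_natCast]
  rcases hd with ((hd | hd) | hd) | hd <;> subst hd
  · rw [show pvDirDict.getD "E" (0,0) = ((0:Int),(1:Int)) from by decide]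
    rw [if_pos rfl]
    exact pvMoveE park hRect a b m.toNat ha hb
  · rw [show pvDirDict.getD "W" (0,0) = ((0:Int),(-1:Int)) from by decide]
    rw [if_neg (by decide), if_pos rfl]
    exact pvMoveW park hRect a b m.toNat ha hb
  · rw [show pvDirDict.getD "S" (0,0) = ((1:Int),(0:Int)) from by decide]
    rw [if_neg (by decide), if_neg (by decide), if_pos rfl]
    exact pvMoveS park hRect a b m.toNat ha hb
  · rw [show pvDirDict.getD "N" (0,0) = ((-1:Int),(0:Int)) from by decide]
    rw [if_neg (by decide), if_neg (by decide), if_neg (by decide)]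
    exact pvMoveN park hRect a b m.toNat ha hb


lemma pvFindS_none (cs : List Char) : ∀ j0, (pvFindS cs j0 = none ↔ 'S' ∉ cs) := by
  induction cs with
  | nil => intro j0; simp [pvFindS]
  | cons c cs IH =>
    intro j0
    rw [pvFindS]
    by_cases hc : c = 'S'
    · subst hc; simp
    · rw [if_neg (by simpa using hc), IH (j0+1)]
      have h2 : ('S' = c) ↔ False :=
        ⟨fun h => hc h.symm, False.elim⟩
      simp [List.mem_cons, h2]

lemma pvFindS_some (cs : List Char) : ∀ j0 j, pvFindS cs j0 = some j →
    j0 ≤ j ∧ cs[j - j0]? = some 'S' ∧ ∀ i, i < j - j0 → cs[i]? ≠ some 'S' := by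
  induction cs with
  | nil => intro j0 j h; simp [pvFindS] at h
  | cons c cs IH =>
    intro j0 j h
    by_cases hc : c = 'S'
    · subst hc
      simp [pvFindS] at h
      subst h
      simp
    · rw [pvFindS, if_neg (by simpa using hc)] at h
      obtain ⟨h1, h2, h3⟩ := IH (j0+1) j h
      refine ⟨by omega, ?_, ?_⟩
      · rw [show j - j0 = (j - (j0+1)) + 1 by omega]
        simpa using h2
      · intro i hi
        rcases i with _ | i
        · simpa using hc
        · have := h3 i (by omega)
          simpa using this

lemma pvPrefS (cs : List Char) (i : Nat) : ['S'] <+: cs.drop i ↔ cs[i]? = some 'S' := by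
  rw [show cs[i]? = (cs.drop i)[0]? from by simp]
  rcases h : cs.drop i with _ | ⟨c, rest⟩
  · simp
  · simp [List.cons_prefix_cons, eq_comm]

lemma pvFindS_vs_find (cs : List Char) :
    PySem.Chars.find cs ['S'] =
      (match pvFindS cs 0 with | some j => (j:Int) | none => -1) := by
  rcases hf : pvFindS cs 0 with _ | j
  · exact (PySem.Chars.find_eq_neg_one_iff cs ['S']).2
      (fun hinf => ((pvFindS_none cs 0).1 hf) ((List.singleton_infix_iff _ _).1 hinf))
  · obtain ⟨_, h2, h3⟩ := pvFindS_some cs 0 j hf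
    simp only [Nat.sub_zero] at h2 h3
    have hinf : ['S'] <:+: cs := (List.singleton_infix_iff _ _).2 (List.mem_of_getElem? h2)
    have h0 : 0 ≤ PySem.Chars.find cs ['S'] := (PySem.Chars.find_nonneg_iff cs ['S']).2 hinf
    obtain ⟨hpre, hmin⟩ := PySem.Chars.find_spec h0
    have hj : (PySem.Chars.find cs ['S']).toNat = j := by
      rcases Nat.lt_trichotomy (PySem.Chars.find cs ['S']).toNat j with hlt | heq | hgt
      · exact absurd ((pvPrefS cs _).1 hpre) (h3 _ hlt)
      · exact heq
      · exact absurd ((pvPrefS cs j).2 h2) (hmin j hgt)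
    show PySem.Chars.find cs ['S'] = (j:Int)
    omega

lemma pvStart (park : List String) : ∀ i0 : Nat,
    pvFirstS park i0 =
      (match pvFindStart park i0 with
        | some q => ((q.1:Int),(q.2:Int)) | none => ((0:Int),(0:Int))) := by
  induction park with
  | nil => intro i0; rfl
  | cons r rest IH =>
    intro i0
    rw [pvFirstS, pvFindStart]
    have hfind : PySem.Str.find r "S" =
        (match pvFindS r.toList 0 with | some j => (j:Int) | none => -1) := by
      rw [PySem.Str.find_eq]
      rw [show ("S" : String).toList = ['S'] from rfl]
      exact pvFindS_vs_find r.toList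
    rcases hf : pvFindS r.toList 0 with _ | j <;> rw [hf] at hfind
    · have h1 : PySem.Str.find r "S" = -1 := by rw [hfind]
      rw [if_neg (fun hcon => hcon h1)]
      exact IH (i0+1)
    · have h1 : PySem.Str.find r "S" = (j:Int) := by rw [hfind]
      rw [if_pos (by rw [h1]; omega)]
      rw [h1]

lemma pvFindStart_mem : ∀ (ps : List String) (i0 i j : Nat), pvFindStart ps i0 = some (i,j) →
    i0 ≤ i ∧ i - i0 < ps.length ∧ ∃ row, ps[i-i0]? = some row ∧ row.toList[j]? = some 'S' := by
  intro ps
  induction ps with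
  | nil => intro i0 i j h; simp [pvFindStart] at h
  | cons r rest IH =>
    intro i0 i j h
    rw [pvFindStart] at h
    rcases hf : pvFindS r.toList 0 with _ | j' <;> rw [hf] at h
    · obtain ⟨h1, h2, row, hrow, hS⟩ := IH (i0+1) i j h
      refine ⟨by omega, by simp only [List.length_cons]; omega, row, ?_, hS⟩
      rw [show i - i0 = (i-(i0+1))+1 by omega, List.getElem?_cons_succ]
      exact hrow
    · simp only [Option.some.injEq, Prod.mk.injEq] at h
      obtain ⟨hi, hj⟩ := h
      subst hi; subst hj
      obtain ⟨_, h2, _⟩ := pvFindS_some r.toList 0 j' hf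
      exact ⟨le_refl _, by simp, r, by simp, by simpa using h2⟩

lemma pvFindStart_isSome (ps : List String) : ∀ i0, (∃ r ∈ ps, 'S' ∈ r.toList) →
    (pvFindStart ps i0).isSome := by
  induction ps with
  | nil => intro i0 h; simp at h
  | cons r rest IH =>
    intro i0 h
    rw [pvFindStart]
    rcases hf : pvFindS r.toList 0 with _ | j'
    · rcases h with ⟨r', hr', hS⟩
      rcases List.mem_cons.1 hr' with he | he
      · rw [he] at hS
        exact absurd hS ((pvFindS_none r.toList 0).1 hf)
      · exact IH (i0+1) ⟨r', he, hS⟩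
    · rfl

lemma pvFold (park : List String)
    (hRect : ∀ s ∈ park, ((s.toList.length : Int)) = pvL park) :
    ∀ (routes : List String) (a b : Nat), (∀ r ∈ routes, pvRouteOk r = true) →
      a < park.length → (b:Int) < pvL park →
      routes.foldl (pvAMove park) ((a:Int),(b:Int)) =
        routes.foldl (pvBMove park (pvCols park) (park.length : Int) (pvL park))
          ((a:Int),(b:Int)) := by
  intro routes
  induction routes with
  | nil => intro a b _ _ _; rfl
  | cons r rest IH =>
    intro a b hall ha hb
    rw [List.foldl_cons, List.foldl_cons]
    obtain ⟨heq, a', b', hval, ha', hb'⟩ := pvMove_eq park r hRect (hall r (by simp)) a b ha hb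
    rw [← heq, hval, IH a' b' (fun x hx => hall x (by simp [hx])) ha' hb']


-- ===== VERDICT (by name: the statement is the Claim_ definition above) =====
theorem solution_spec : Claim_equal_solution := by
  intro park routes _hdom hpre
  obtain ⟨hS, hrectD, hroutes⟩ := hpre
  have hex : ∃ r ∈ park, 'S' ∈ r.toList := by
    obtain ⟨r, hr, hc⟩ := List.any_eq_true.1 hS
    exact ⟨r, hr, by simpa using hc⟩
  obtain ⟨⟨i, j⟩, hfs⟩ := Option.isSome_iff_exists.1 (pvFindStart_isSome park 0 hex)
  obtain ⟨_, hilen, row, hrow, hSrow⟩ := pvFindStart_mem park 0 i j hfs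
  simp only [Nat.sub_zero] at hilen hrow
  have hstartA : (pvFindStart park 0).getD (0,0) = (i, j) := by rw [hfs]; rfl
  have hstartB : pvFirstS park 0 = ((i:Int), (j:Int)) := by rw [pvStart park 0, hfs]
  rcases hrectD with hnil | hrect
  · subst hnil
    unfold Spec_solution solution solution_alt
    simp only [hstartA, hstartB, List.foldl_nil]
  · have hRect : ∀ s ∈ park, ((s.toList.length : Int)) = pvL park := by
      intro s hs
      have h1 := (List.all_eq_true.1 hrect) s hs
      simp only [beq_iff_eq] at h1
      rw [pvL, pvGetD0_head, PySem.Str.len_eq]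
      exact_mod_cast h1
    have hj : (j:Int) < pvL park := by
      have h1 := hRect row (List.mem_of_getElem? hrow)
      have h2 : j < row.toList.length := (List.getElem?_eq_some_iff.1 hSrow).1
      omega
    have hall : ∀ r ∈ routes, pvRouteOk r = true := List.all_eq_true.1 hroutes
    have hfold := pvFold park hRect routes i j hall hilen hj
    unfold Spec_solution solution solution_alt
    simp only [hstartA, hstartB]
    rw [hfold]
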